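-- pv_equiv track=rewrite | github.com/ag1455/OpenPLi-PC | plugins/third-party-plugins/Plugins/Extensions/KodiLite/IPTV/plugin.video.SportsDevil/lib/utils/javascriptUtils.py | ionX
-- ===== SOURCE A (Python) =====
-- def ionX(x, arrayX):
--     r = []
--     s = 0
--     w = 0
--
--     for d in x:
--         w |= int(arrayX[ord(d)-48]) << s
--         if (s):
--             r.append(chr(165 ^ w & 255))
--             w >>= 8
--             s -= 2
--         else:
--             s = 6
--
--     r = ''.join(r)
--     return r
-- ===== SOURCE B (Python) =====
-- def ionX(x, arrayX):
--     # Build one big integer with every decoded 6-bit field OR'd in at bit 6*i,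
--     # then slice the output bytes at bit 8*k (OR, not sum: fields may overlap).
--     G = 0
--     for i, d in enumerate(x):
--         G |= int(arrayX[ord(d) - 48]) << (6 * i)
--     m = len(x) - (len(x) + 3) // 4
--     return ''.join(chr(165 ^ (G >> (8 * k)) & 255) for k in range(m))
-- ===== Notes on version B (the rewrite author's own statement) =====
-- stated objective: alternative
-- what changed: Replaces A's streaming sliding bit-buffer (state w,s updated per char, one byte emitted per non-phase-0 char) by first OR-ing every looked-up value into one big integer at global bit position 6*i and then extracting the len(x)-(len(x)+3)//4 output bytes as (G>>(8*k))&255.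
import Mathlib
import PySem

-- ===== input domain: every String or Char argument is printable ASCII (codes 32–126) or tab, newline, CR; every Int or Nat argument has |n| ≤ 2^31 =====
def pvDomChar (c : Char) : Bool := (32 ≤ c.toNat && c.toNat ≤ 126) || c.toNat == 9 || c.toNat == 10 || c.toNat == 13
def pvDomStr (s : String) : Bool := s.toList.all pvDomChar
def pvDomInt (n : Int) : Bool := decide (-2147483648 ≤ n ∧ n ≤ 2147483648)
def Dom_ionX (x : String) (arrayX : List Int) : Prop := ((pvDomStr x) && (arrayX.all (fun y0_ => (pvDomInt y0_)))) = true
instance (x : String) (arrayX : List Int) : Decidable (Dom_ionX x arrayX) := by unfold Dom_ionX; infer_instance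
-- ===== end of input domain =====

-- B replaces A's streaming sliding bit-buffer by building one big integer of all
-- decoded 6-bit fields (OR'd at bit 6*i) and slicing the output bytes at bit 8*k;
-- objective: alternative decomposition (not faster).

-- ===== PORT A =====
-- A's for-loop over the characters, with its state (r, s, w), as structural recursion.
def ionXLoop (arrayX : List Int) : List Char → (List Char × Nat × Int) → (List Char × Nat × Int)
  | [], st => st
  | d :: l, (r, s, w) =>
    -- w |= int(arrayX[ord(d)-48]) << s   (lookup raises outside Pre_; the port's
    -- `.getD 0` is never taken under Pre_ionX)
    let w' := PySem.Int.bor w (((PySem.List.pyGet? arrayX ((d.toNat : Int) - 48)).getD 0) <<< s)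
    if s ≠ 0 then
      ionXLoop arrayX l
        (r ++ [Char.ofNat (PySem.Int.bxor 165 (PySem.Int.band w' 255)).toNat], s - 2, w' >>> (8 : Nat))
    else
      ionXLoop arrayX l (r, 6, w')

def ionX (x : String) (arrayX : List Int) : String :=
  String.mk (ionXLoop arrayX x.toList ([], 0, 0)).1

-- ===== PORT B =====
def ionX_alt (x : String) (arrayX : List Int) : String :=
  -- G |= int(arrayX[ord(d)-48]) << (6*i)  for i, d in enumerate(x)
  let G := (x.toList.zipIdx).foldl
    (fun g di =>
      PySem.Int.bor g (((PySem.List.pyGet? arrayX ((di.1.toNat : Int) - 48)).getD 0) <<< (6 * di.2 : Nat)))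
    0
  let n := x.toList.length
  let m := n - (n + 3) / 4
  String.mk ((List.range m).map (fun (k : Nat) =>
    Char.ofNat (PySem.Int.bxor 165 (PySem.Int.band (G >>> (8 * k : Nat)) 255)).toNat))

-- ===== PRECONDITION & SPEC =====
-- Pre_ excludes exactly the inputs where A's arrayX[ord(d)-48] raises IndexError
-- (Python negative indices wrap, so only indices outside [-len, len) raise).
def Pre_ionX (x : String) (arrayX : List Int) : Prop :=
  (x.toList.all fun c =>
    decide (PySem.Raise.InRange arrayX.length ((c.toNat : Int) - 48))) = true
instance (x : String) (arrayX : List Int) : Decidable (Pre_ionX x arrayX) := by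
  unfold Pre_ionX; infer_instance
def pvWitness_ionX : String × List Int := ("0", [7])

def Spec_ionX (x : String) (arrayX : List Int) (out : String) : Prop := out = ionX_alt x arrayX
instance (x : String) (arrayX : List Int) (out : String) : Decidable (Spec_ionX x arrayX out) := by
  unfold Spec_ionX; infer_instance

-- ===== CLAIM (what is proved, stated in full; the proofs are below) =====
def Claim_equal_ionX : Prop := ∀ (x : String) (arrayX : List Int),
  Dom_ionX x arrayX → Pre_ionX x arrayX → Spec_ionX x arrayX (ionX x arrayX)

-- ===== LEMMAS AND PROOFS =====

-- Shorthands for the values both ports compute.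
def pvV (arrayX : List Int) (d : Char) : Int :=
  (PySem.List.pyGet? arrayX ((d.toNat : Int) - 48)).getD 0
def pvByte (w : Int) : Char :=
  Char.ofNat (PySem.Int.bxor 165 (PySem.Int.band w 255)).toNat
-- The big integer of all fields, right-nested (head field at bit 0).
def pvG (a : List Int) : List Char → Int
  | [] => 0
  | d :: l => PySem.Int.bor (pvV a d) (pvG a l <<< (6 : Nat))
-- Number of bytes A emits starting from shift state s.
def pvCnt : Nat → List Char → Nat
  | _, [] => 0
  | s, _ :: l => if s ≠ 0 then 1 + pvCnt (s - 2) l else pvCnt 6 l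
-- A's loop without the accumulator.
def pvOut (a : List Int) : List Char → Nat → Int → List Char
  | [], _, _ => []
  | d :: l, s, w =>
    let w' := PySem.Int.bor w (pvV a d <<< s)
    if s ≠ 0 then pvByte w' :: pvOut a l (s - 2) (w' >>> (8 : Nat))
    else pvOut a l 6 w'

-- ---- Nat-level bit lemmas ----

theorem pvNatDisjAdd (x : Nat) : ∀ y, x &&& y = 0 → x + y = x ||| y := by
  induction x using Nat.binaryRec with
  | zero => intro y h; simp
  | bit b x ih =>
    intro y h
    obtain ⟨b', y', rfl⟩ : ∃ b' y', y = Nat.bit b' y' :=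
      ⟨y.bodd, y.div2, (Nat.bit_bodd_div2 y).symm⟩
    rw [Nat.land_bit] at h
    rw [Nat.bit_eq_zero_iff] at h
    rw [Nat.lor_bit]
    have h2 := ih _ h.1
    have hbb : (b && b') = false := h.2
    simp only [Nat.bit_val]
    cases b <;> cases b' <;>
      simp only [Bool.toNat_true, Bool.toNat_false, Bool.or_false,
        Bool.or_self, Bool.or_true] <;>
      first
      | exact absurd hbb (by decide)
      | omega

theorem pvNatLdiffAdd (n m : Nat) : (n &&& m) + n.ldiff m = n := by
  have hdisj : (n &&& m) &&& n.ldiff m = 0 := by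
    apply Nat.eq_of_testBit_eq; intro i
    simp only [Nat.testBit_land, Nat.testBit_ldiff, Nat.zero_testBit]
    cases n.testBit i <;> cases m.testBit i <;> simp
  rw [pvNatDisjAdd _ _ hdisj]
  apply Nat.eq_of_testBit_eq; intro i
  simp only [Nat.testBit_lor, Nat.testBit_land, Nat.testBit_ldiff]
  cases n.testBit i <;> cases m.testBit i <;> simp

theorem pvNatSubAnd (n m : Nat) : n - (n &&& m) = n.ldiff m := by
  have := pvNatLdiffAdd n m; omega

theorem pvPredShl (m n : Nat) : (m + 1) <<< n - 1 = m <<< n ||| (2 ^ n - 1) := by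
  have h1 : (1 : Nat) ≤ 2 ^ n := Nat.one_le_two_pow
  have hd : m <<< n &&& (2 ^ n - 1) = 0 := by
    apply Nat.eq_of_testBit_eq; intro i
    simp only [Nat.testBit_land, Nat.testBit_shiftLeft, Nat.testBit_two_pow_sub_one,
      Nat.zero_testBit]
    by_cases h : i < n
    · simp [Nat.not_le.2 h]
    · simp [h]
  rw [← pvNatDisjAdd _ _ hd, Nat.shiftLeft_eq, Nat.shiftLeft_eq]
  have e : (m + 1) * 2 ^ n = m * 2 ^ n + 2 ^ n := by ring
  omega

theorem pvTbPredShl (m n k : Nat) :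
    ((m + 1) <<< n - 1).testBit k = (decide (k < n) || m.testBit (k - n)) := by
  rw [pvPredShl]
  simp only [Nat.testBit_lor, Nat.testBit_shiftLeft, Nat.testBit_two_pow_sub_one]
  by_cases h : k < n
  · simp [h]
  · simp [h, Nat.le_of_not_lt h]

-- ---- Int testBit toolkit ----

theorem pvTbOfNat (m k : Nat) : (Int.ofNat m).testBit k = m.testBit k := rfl
theorem pvTbNegSucc (m k : Nat) : (Int.negSucc m).testBit k = !m.testBit k := rfl

theorem pvIntExt {a b : Int} (h : ∀ k, a.testBit k = b.testBit k) : a = b := by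
  cases a with
  | ofNat m =>
    cases b with
    | ofNat n =>
      have : m = n := Nat.eq_of_testBit_eq (fun i => by
        have := h i; rwa [pvTbOfNat, pvTbOfNat] at this)
      rw [this]
    | negSucc n =>
      exfalso
      have hK := h (max m n)
      rw [pvTbOfNat, pvTbNegSucc] at hK
      rw [Nat.testBit_lt_two_pow (lt_of_le_of_lt (le_max_left m n) Nat.lt_two_pow_self),
        Nat.testBit_lt_two_pow (lt_of_le_of_lt (le_max_right m n) Nat.lt_two_pow_self)] at hK
      simp at hK
  | negSucc m =>
    cases b with
    | ofNat n =>
      exfalso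
      have hK := h (max m n)
      rw [pvTbOfNat, pvTbNegSucc] at hK
      rw [Nat.testBit_lt_two_pow (lt_of_le_of_lt (le_max_left m n) Nat.lt_two_pow_self),
        Nat.testBit_lt_two_pow (lt_of_le_of_lt (le_max_right m n) Nat.lt_two_pow_self)] at hK
      simp at hK
    | negSucc n =>
      have : m = n := Nat.eq_of_testBit_eq (fun i => by
        have := h i; rw [pvTbNegSucc, pvTbNegSucc] at this
        exact Bool.not_inj this)
      rw [this]

theorem pvTbShr (a : Int) (n k : Nat) : (a >>> n).testBit k = a.testBit (n + k) := by
  cases a with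
  | ofNat m =>
    show (Int.ofNat (m >>> n)).testBit k = (Int.ofNat m).testBit (n + k)
    rw [pvTbOfNat, pvTbOfNat, Nat.testBit_shiftRight]
  | negSucc m =>
    show (Int.negSucc (m >>> n)).testBit k = (Int.negSucc m).testBit (n + k)
    rw [pvTbNegSucc, pvTbNegSucc, Nat.testBit_shiftRight]

theorem pvTbShl (a : Int) (n k : Nat) :
    (a <<< n).testBit k = (decide (n ≤ k) && a.testBit (k - n)) := by
  cases a with
  | ofNat m =>
    show (Int.ofNat (m <<< n)).testBit k = _
    rw [pvTbOfNat, pvTbOfNat, Nat.testBit_shiftLeft]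
  | negSucc m =>
    show (Int.negSucc ((m + 1) <<< n - 1)).testBit k = _
    rw [pvTbNegSucc, pvTbNegSucc, pvTbPredShl]
    by_cases h : n ≤ k
    · simp [h, Nat.not_lt.2 h]
    · simp [h, Nat.lt_of_not_le h]

-- ---- bridges: PySem's Python-exact bitwise ops are core Int.lor / Int.land ----

theorem pvNegSuccAux (n : Nat) : -Int.negSucc n - 1 = (n : Int) := by
  rw [Int.negSucc_eq]; ring

theorem pvBorLor (a b : Int) : PySem.Int.bor a b = Int.lor a b := by
  cases a with
  | ofNat m =>
    cases b with
    | ofNat n =>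
      have h1 : (0 : Int) ≤ Int.ofNat m := Int.natCast_nonneg m
      have h2 : (0 : Int) ≤ Int.ofNat n := Int.natCast_nonneg n
      simp only [PySem.Int.bor, if_pos h1, if_pos h2]
      rfl
    | negSucc n =>
      have h1 : (0 : Int) ≤ Int.ofNat m := Int.natCast_nonneg m
      have h2 : ¬ (0 : Int) ≤ Int.negSucc n := by rw [Int.negSucc_eq]; omega
      simp only [PySem.Int.bor, if_pos h1, if_neg h2]
      rw [pvNegSuccAux, Int.toNat_natCast]
      have e2 : (Int.ofNat m).toNat = m := rfl
      rw [e2, pvNatSubAnd]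
      show _ = Int.negSucc (n.ldiff m)
      rw [Int.negSucc_eq]; ring
  | negSucc m =>
    cases b with
    | ofNat n =>
      have h1 : ¬ (0 : Int) ≤ Int.negSucc m := by rw [Int.negSucc_eq]; omega
      have h2 : (0 : Int) ≤ Int.ofNat n := Int.natCast_nonneg n
      simp only [PySem.Int.bor, if_pos h2, if_neg h1]
      rw [pvNegSuccAux, Int.toNat_natCast]
      have e2 : (Int.ofNat n).toNat = n := rfl
      rw [e2, pvNatSubAnd]
      show _ = Int.negSucc (m.ldiff n)
      rw [Int.negSucc_eq]; ring
    | negSucc n =>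
      have h1 : ¬ (0 : Int) ≤ Int.negSucc m := by rw [Int.negSucc_eq]; omega
      have h2 : ¬ (0 : Int) ≤ Int.negSucc n := by rw [Int.negSucc_eq]; omega
      simp only [PySem.Int.bor, if_neg h1, if_neg h2]
      rw [pvNegSuccAux, pvNegSuccAux, Int.toNat_natCast, Int.toNat_natCast]
      show _ = Int.negSucc (m &&& n)
      rw [Int.negSucc_eq]; ring

theorem pvBandLand (a b : Int) : PySem.Int.band a b = Int.land a b := by
  cases a with
  | ofNat m =>
    cases b with
    | ofNat n =>
      have h1 : (0 : Int) ≤ Int.ofNat m := Int.natCast_nonneg m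
      have h2 : (0 : Int) ≤ Int.ofNat n := Int.natCast_nonneg n
      simp only [PySem.Int.band, if_pos h1, if_pos h2]
      rfl
    | negSucc n =>
      have h1 : (0 : Int) ≤ Int.ofNat m := Int.natCast_nonneg m
      have h2 : ¬ (0 : Int) ≤ Int.negSucc n := by rw [Int.negSucc_eq]; omega
      simp only [PySem.Int.band, if_pos h1, if_neg h2]
      rw [pvNegSuccAux, Int.toNat_natCast]
      have e2 : (Int.ofNat m).toNat = m := rfl
      rw [e2, pvNatSubAnd]
      rfl
  | negSucc m =>
    cases b with
    | ofNat n =>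
      have h1 : ¬ (0 : Int) ≤ Int.negSucc m := by rw [Int.negSucc_eq]; omega
      have h2 : (0 : Int) ≤ Int.ofNat n := Int.natCast_nonneg n
      simp only [PySem.Int.band, if_pos h2, if_neg h1]
      rw [pvNegSuccAux, Int.toNat_natCast]
      have e2 : (Int.ofNat n).toNat = n := rfl
      rw [e2, pvNatSubAnd]
      rfl
    | negSucc n =>
      have h1 : ¬ (0 : Int) ≤ Int.negSucc m := by rw [Int.negSucc_eq]; omega
      have h2 : ¬ (0 : Int) ≤ Int.negSucc n := by rw [Int.negSucc_eq]; omega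
      simp only [PySem.Int.band, if_neg h1, if_neg h2]
      rw [pvNegSuccAux, pvNegSuccAux, Int.toNat_natCast, Int.toNat_natCast]
      show _ = Int.negSucc (m ||| n)
      rw [Int.negSucc_eq]; ring

theorem pvTbBor (a b : Int) (k : Nat) :
    (PySem.Int.bor a b).testBit k = (a.testBit k || b.testBit k) := by
  rw [pvBorLor]; exact Int.testBit_lor a b k

theorem pvTbBand (a b : Int) (k : Nat) :
    (PySem.Int.band a b).testBit k = (a.testBit k && b.testBit k) := by
  rw [pvBandLand]; exact Int.testBit_land a b k

-- ---- derived Int algebra used by the invariant ----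

theorem pvBorAssoc (a b c : Int) :
    PySem.Int.bor (PySem.Int.bor a b) c = PySem.Int.bor a (PySem.Int.bor b c) := by
  apply pvIntExt; intro k
  simp only [pvTbBor, Bool.or_assoc]

theorem pvZeroBor (a : Int) : PySem.Int.bor 0 a = a := by
  rw [PySem.Int.bor_comm]; exact PySem.Int.bor_zero a

theorem pvShlZero (a : Int) : a <<< (0 : Nat) = a := by
  apply pvIntExt; intro k
  rw [pvTbShl]
  simp

theorem pvShrZero (a : Int) : a >>> (0 : Nat) = a := by
  apply pvIntExt; intro k
  rw [pvTbShr, Nat.zero_add]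

theorem pvBorShl (a b : Int) (n : Nat) :
    (PySem.Int.bor a b) <<< n = PySem.Int.bor (a <<< n) (b <<< n) := by
  apply pvIntExt; intro k
  simp only [pvTbBor, pvTbShl]
  by_cases h : n ≤ k <;> simp [h]

theorem pvBorShr (a b : Int) (n : Nat) :
    (PySem.Int.bor a b) >>> n = PySem.Int.bor (a >>> n) (b >>> n) := by
  apply pvIntExt; intro k
  simp only [pvTbBor, pvTbShr]

theorem pvShlShr (a : Int) (m n : Nat) (h : n ≤ m) : (a <<< m) >>> n = a <<< (m - n) := by
  apply pvIntExt; intro k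
  rw [pvTbShr, pvTbShl, pvTbShl]
  by_cases h1 : m ≤ n + k
  · have h2 : m - n ≤ k := by omega
    have e : n + k - m = k - (m - n) := by omega
    simp [h1, h2, e]
  · have h2 : ¬ (m - n ≤ k) := by omega
    simp [h1, h2]

theorem pvTb255 (k : Nat) : (255 : Int).testBit k = decide (k < 8) := by
  show (Int.ofNat 255).testBit k = _
  rw [pvTbOfNat]
  show ((2 ^ 8 - 1 : Nat)).testBit k = _
  rw [Nat.testBit_two_pow_sub_one]

theorem pvLowByte (a b : Int) (n : Nat) (h8 : 8 ≤ n) :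
    PySem.Int.band (PySem.Int.bor a (b <<< n)) 255 = PySem.Int.band a 255 := by
  apply pvIntExt; intro k
  simp only [pvTbBand, pvTbBor, pvTbShl, pvTb255]
  by_cases hk : k < 8
  · have : ¬ n ≤ k := by omega
    simp [hk, this]
  · simp [hk]

-- ---- loop characterisations ----

theorem pvFoldA (arrayX : List Int) (l : List Char) : ∀ (r : List Char) (s : Nat) (w : Int),
    (ionXLoop arrayX l (r, s, w)).1 = r ++ pvOut arrayX l s w := by
  induction l with
  | nil => intro r s w; simp [ionXLoop, pvOut]
  | cons d l ih =>
    intro r s w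
    by_cases hs : s ≠ 0
    · simp only [ionXLoop, pvOut, pvV, pvByte, if_pos hs]
      rw [ih]
      simp
    · simp only [ionXLoop, pvOut, pvV, if_neg hs]
      rw [ih]

theorem pvMain (a : List Int) (l : List Char) : ∀ (s : Nat) (w : Int),
    (s = 0 ∨ s = 2 ∨ s = 4 ∨ s = 6) →
    pvOut a l s w = (List.range (pvCnt s l)).map
      (fun (k : Nat) => pvByte ((PySem.Int.bor w (pvG a l <<< s)) >>> (8 * k : Nat))) := by
  induction l with
  | nil => intro s w _; simp [pvOut, pvCnt]
  | cons d l ih =>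
    intro s w hs
    by_cases h0 : s = 0
    · subst h0
      simp only [pvOut, pvCnt, ne_eq, not_true_eq_false, if_false]
      rw [ih 6 _ (by omega)]
      have hW : PySem.Int.bor (PySem.Int.bor w (pvV a d <<< (0 : Nat))) (pvG a l <<< (6 : Nat))
          = PySem.Int.bor w (pvG a (d :: l) <<< (0 : Nat)) := by
        rw [pvShlZero, pvShlZero, pvBorAssoc]
        rfl
      simp only [hW]
    · have hs' : s = 2 ∨ s = 4 ∨ s = 6 := by omega
      have hne : s ≠ 0 := h0
      simp only [pvOut, pvCnt, if_pos hne]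
      rw [ih (s - 2) _ (by omega)]
      -- the whole-integer view of the current buffer
      have hW : PySem.Int.bor w (pvG a (d :: l) <<< s)
          = PySem.Int.bor (PySem.Int.bor w (pvV a d <<< s)) (pvG a l <<< (6 + s : Nat)) := by
        show PySem.Int.bor w ((PySem.Int.bor (pvV a d) (pvG a l <<< (6 : Nat))) <<< s) = _
        rw [pvBorShl, ← pvBorAssoc, Int.shiftLeft_add]
      have hcnt : pvCnt (s - 2) l + 1 = 1 + pvCnt (s - 2) l := by omega
      rw [← hcnt, List.range_succ_eq_map]
      simp only [List.map_cons, List.map_map]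
      congr 1
      · -- head byte
        show pvByte (PySem.Int.bor w (pvV a d <<< s))
          = pvByte ((PySem.Int.bor w (pvG a (d :: l) <<< s)) >>> (8 * 0 : Nat))
        rw [hW, Nat.mul_zero, pvShrZero]
        unfold pvByte
        have h68 : (8 : Nat) ≤ 6 + s := by omega
        conv_rhs => rw [pvLowByte _ _ _ h68]
      · -- remaining bytes
        apply List.map_congr_left
        intro k _
        show pvByte ((PySem.Int.bor (PySem.Int.bor w (pvV a d <<< s) >>> (8 : Nat)) (pvG a l <<< (s - 2))) >>> (8 * k : Nat))
          = pvByte ((PySem.Int.bor w (pvG a (d :: l) <<< s)) >>> (8 * Nat.succ k : Nat))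
        have e1 : 8 * Nat.succ k = 8 + 8 * k := by omega
        have e2 : 6 + s - 8 = s - 2 := by omega
        have h68 : (8 : Nat) ≤ 6 + s := by omega
        conv_rhs => rw [hW, e1, Int.shiftRight_add, pvBorShr, pvShlShr _ _ _ h68, e2]

theorem pvFoldB (a : List Int) (l : List Char) : ∀ (g : Int) (i : Nat),
    List.foldl
      (fun g di =>
        PySem.Int.bor g (((PySem.List.pyGet? a ((di.1.toNat : Int) - 48)).getD 0) <<< (6 * di.2 : Nat)))
      g (l.zipIdx i)
    = PySem.Int.bor g (pvG a l <<< (6 * i : Nat)) := by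
  induction l with
  | nil => intro g i; simp [pvG, PySem.Int.bor_zero]
  | cons d l ih =>
    intro g i
    rw [List.zipIdx_cons, List.foldl_cons, ih]
    show PySem.Int.bor (PySem.Int.bor g (pvV a d <<< (6 * i : Nat))) (pvG a l <<< (6 * (i + 1) : Nat))
      = PySem.Int.bor g ((PySem.Int.bor (pvV a d) (pvG a l <<< (6 : Nat))) <<< (6 * i : Nat))
    rw [pvBorShl, ← pvBorAssoc]
    have e : 6 * (i + 1) = 6 + 6 * i := by omega
    rw [e, Int.shiftLeft_add]

theorem pvCntEq (l : List Char) : ∀ s, (s = 0 ∨ s = 2 ∨ s = 4 ∨ s = 6) →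
    pvCnt s l = l.length - (l.length - s / 2 + 3) / 4 := by
  induction l with
  | nil => intro s _; simp [pvCnt]
  | cons d l ih =>
    intro s hs
    by_cases h0 : s = 0
    · subst h0
      show pvCnt 6 l = _
      rw [ih 6 (by omega)]
      simp only [List.length_cons]
      omega
    · show (if s ≠ 0 then 1 + pvCnt (s - 2) l else pvCnt 6 l) = _
      rw [if_pos h0, ih (s - 2) (by omega)]
      simp only [List.length_cons]
      omega

-- ===== VERDICT (by name: the statement is the Claim_ definition above) =====
theorem ionX_spec : Claim_equal_ionX := by
  intro x a _ _
  unfold Spec_ionX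
  show ionX x a = ionX_alt x a
  simp only [ionX, ionX_alt]
  rw [pvFoldA a x.toList [] 0 0, List.nil_append,
    pvMain a x.toList 0 0 (by omega),
    pvFoldB a x.toList 0 0,
    pvCntEq x.toList 0 (by omega)]
  simp only [pvZeroBor, Nat.mul_zero, pvShlZero, Nat.zero_div, Nat.sub_zero, pvByte]
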